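-- pv_equiv track=rewrite | github.com/jenafrank/skatsearch | research/scripts/plot_grand.py | parse_cards_max_suit
-- ===== SOURCE A (Python) =====
-- def parse_cards_max_suit(card_str):
--     # Same logic as analyze_thresholds
--     if not isinstance(card_str, str): return 0
--     content = card_str.strip('[]')
--     cards = content.split()
--     suits = {'C': 0, 'S': 0, 'H': 0, 'D': 0}
--     for c in cards:
--         if 'J' not in c: # Exclude Jacks
--             s_char = c[0]
--             if s_char in suits:
--                 suits[s_char] += 1
--     if not suits: return 0
--     return max(suits.values())
-- ===== SOURCE B (Python) =====
-- def parse_cards_max_suit(card_str):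
--     if not isinstance(card_str, str):
--         return 0
--     cards = card_str.strip('[]').split()
--     return max(sum(1 for c in cards if 'J' not in c and c.startswith(s)) for s in 'CSHD')
-- ===== Notes on version B (the rewrite author's own statement) =====
-- stated objective: simpler
-- what changed: Replaces the single-pass mutable suit tally dict with four independent filtered count-scans (one countP per suit) combined by an outer max.
import Mathlib
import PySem

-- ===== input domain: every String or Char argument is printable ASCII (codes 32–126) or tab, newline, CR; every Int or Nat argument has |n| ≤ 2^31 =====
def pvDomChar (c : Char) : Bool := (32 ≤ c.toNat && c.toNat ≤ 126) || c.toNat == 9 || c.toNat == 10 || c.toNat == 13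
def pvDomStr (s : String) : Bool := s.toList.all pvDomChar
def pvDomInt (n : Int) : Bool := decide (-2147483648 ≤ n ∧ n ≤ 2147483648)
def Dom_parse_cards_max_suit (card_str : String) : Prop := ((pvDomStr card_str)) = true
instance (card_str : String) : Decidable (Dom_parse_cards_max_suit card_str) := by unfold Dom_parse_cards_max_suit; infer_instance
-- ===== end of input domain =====

-- B replaces A's single-pass mutable suit tally dict by four independent count-scans (one per suit) under an outer max; objective: simpler.

-- ===== PORT A =====
-- literal port of A: strip '[]', split, tally non-jack cards per suit in an insertion-ordered dict, return max of values
def parse_cards_max_suit (card_str : String) : Int :=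
  let content := PySem.Str.stripChars card_str "[]"
  let cards := PySem.Str.split₀ content
  let suits : PySem.Dict Char Int := PySem.Dict.ofList [('C', 0), ('S', 0), ('H', 0), ('D', 0)]
  let suits := cards.foldl (fun d c =>
    if !(PySem.Str.isIn "J" c) then
      match PySem.Str.pyGet? c 0 with        -- c[0]; none = IndexError, unreachable: split() yields nonempty tokens
      | some s_char => if d.contains s_char then d.modify s_char 0 (· + 1) else d
      | none => d
    else d) suits
  match PySem.List.max? suits.values (fun v => v) with   -- 'if not suits: return 0' = the none branch
  | some m => m
  | none => 0

-- ===== PORT B =====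
def parse_cards_max_suit_alt (card_str : String) : Int :=
  let cards := PySem.Str.split₀ (PySem.Str.stripChars card_str "[]")
  let counts := "CSHD".toList.map (fun s =>
    (cards.countP (fun c => !(PySem.Str.isIn "J" c) && PySem.Str.startswith c (String.ofList [s])) : Int))
  match PySem.List.max? counts (fun v => v) with         -- max over the four suit totals; counts is never empty
  | some m => m
  | none => 0

-- ===== PRECONDITION & SPEC =====
def Spec_parse_cards_max_suit (card_str : String) (out : Int) : Prop := out = parse_cards_max_suit_alt card_str
instance (card_str : String) (out : Int) : Decidable (Spec_parse_cards_max_suit card_str out) := by unfold Spec_parse_cards_max_suit; infer_instance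

-- ===== CLAIM (what is proved, stated in full; the proofs are below) =====
def Claim_equal_parse_cards_max_suit : Prop := ∀ (card_str : String), Dom_parse_cards_max_suit card_str → Spec_parse_cards_max_suit card_str (parse_cards_max_suit card_str)

-- ===== LEMMAS AND PROOFS =====

-- the per-suit count A's tally realises
def pvCnt (s : Char) (cards : List String) : Int :=
  (cards.countP (fun c => !(PySem.Str.isIn "J" c) && (PySem.Str.pyGet? c 0 == some s)) : Int)

lemma pvCnt_cons_pos {s : Char} {c : String} (t : List String)
    (h : (!(PySem.Str.isIn "J" c) && (PySem.Str.pyGet? c 0 == some s)) = true) :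
    pvCnt s (c :: t) = 1 + pvCnt s t := by
  simp only [pvCnt, List.countP_cons, h, if_true]
  push_cast
  omega

lemma pvCnt_cons_neg {s : Char} {c : String} (t : List String)
    (h : (!(PySem.Str.isIn "J" c) && (PySem.Str.pyGet? c 0 == some s)) = false) :
    pvCnt s (c :: t) = pvCnt s t := by
  simp only [pvCnt, List.countP_cons, h]
  norm_num

lemma fold_values (cards : List String) (a b c d : Int) :
    ((cards.foldl (fun d c =>
      if !(PySem.Str.isIn "J" c) then
        match PySem.Str.pyGet? c 0 with
        | some s_char => if d.contains s_char then d.modify s_char 0 (· + 1) else d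
        | none => d
      else d) (PySem.Dict.mk [('C', a), ('S', b), ('H', c), ('D', d)])).values)
    = [a + pvCnt 'C' cards, b + pvCnt 'S' cards, c + pvCnt 'H' cards, d + pvCnt 'D' cards] := by
  induction cards generalizing a b c d with
  | nil => simp [pvCnt, PySem.Dict.values]
  | cons x t ih =>
    rw [List.foldl_cons]
    by_cases hJ : PySem.Str.isIn "J" x
    · rw [if_neg (by rw [hJ]; simp), ih,
        pvCnt_cons_neg t (by rw [hJ]; rfl), pvCnt_cons_neg t (by rw [hJ]; rfl),
        pvCnt_cons_neg t (by rw [hJ]; rfl), pvCnt_cons_neg t (by rw [hJ]; rfl)]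
    · simp only [Bool.not_eq_true] at hJ
      rw [if_pos (by rw [hJ]; rfl)]
      rcases hg : PySem.Str.pyGet? x 0 with _ | ch
      · simp only []
        rw [ih, pvCnt_cons_neg t (by rw [hJ, hg]; rfl), pvCnt_cons_neg t (by rw [hJ, hg]; rfl),
          pvCnt_cons_neg t (by rw [hJ, hg]; rfl), pvCnt_cons_neg t (by rw [hJ, hg]; rfl)]
      · by_cases hC : ch = 'C'
        · subst hC
          have eC : (if (PySem.Dict.mk [('C', a), ('S', b), ('H', c), ('D', d)] : PySem.Dict Char Int).contains 'C' = true then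
              (PySem.Dict.mk [('C', a), ('S', b), ('H', c), ('D', d)] : PySem.Dict Char Int).modify 'C' 0 (· + 1)
              else PySem.Dict.mk [('C', a), ('S', b), ('H', c), ('D', d)]) = PySem.Dict.mk [('C', a + 1), ('S', b), ('H', c), ('D', d)] := rfl
          simp only [eC]
          rw [ih, pvCnt_cons_pos t (by rw [hJ, hg]; rfl), pvCnt_cons_neg t (by rw [hJ, hg]; rfl),
            pvCnt_cons_neg t (by rw [hJ, hg]; rfl), pvCnt_cons_neg t (by rw [hJ, hg]; rfl)]
          simp [add_assoc]
        · by_cases hS : ch = 'S'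
          · subst hS
            have eS : (if (PySem.Dict.mk [('C', a), ('S', b), ('H', c), ('D', d)] : PySem.Dict Char Int).contains 'S' = true then
                (PySem.Dict.mk [('C', a), ('S', b), ('H', c), ('D', d)] : PySem.Dict Char Int).modify 'S' 0 (· + 1)
                else PySem.Dict.mk [('C', a), ('S', b), ('H', c), ('D', d)]) = PySem.Dict.mk [('C', a), ('S', b + 1), ('H', c), ('D', d)] := rfl
            simp only [eS]
            rw [ih, pvCnt_cons_neg t (by rw [hJ, hg]; rfl), pvCnt_cons_pos t (by rw [hJ, hg]; rfl),
              pvCnt_cons_neg t (by rw [hJ, hg]; rfl), pvCnt_cons_neg t (by rw [hJ, hg]; rfl)]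
            simp [add_assoc]
          · by_cases hH : ch = 'H'
            · subst hH
              have eH : (if (PySem.Dict.mk [('C', a), ('S', b), ('H', c), ('D', d)] : PySem.Dict Char Int).contains 'H' = true then
                  (PySem.Dict.mk [('C', a), ('S', b), ('H', c), ('D', d)] : PySem.Dict Char Int).modify 'H' 0 (· + 1)
                  else PySem.Dict.mk [('C', a), ('S', b), ('H', c), ('D', d)]) = PySem.Dict.mk [('C', a), ('S', b), ('H', c + 1), ('D', d)] := rfl
              simp only [eH]
              rw [ih, pvCnt_cons_neg t (by rw [hJ, hg]; rfl), pvCnt_cons_neg t (by rw [hJ, hg]; rfl),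
                pvCnt_cons_pos t (by rw [hJ, hg]; rfl), pvCnt_cons_neg t (by rw [hJ, hg]; rfl)]
              simp [add_assoc]
            · by_cases hD : ch = 'D'
              · subst hD
                have eD : (if (PySem.Dict.mk [('C', a), ('S', b), ('H', c), ('D', d)] : PySem.Dict Char Int).contains 'D' = true then
                    (PySem.Dict.mk [('C', a), ('S', b), ('H', c), ('D', d)] : PySem.Dict Char Int).modify 'D' 0 (· + 1)
                    else PySem.Dict.mk [('C', a), ('S', b), ('H', c), ('D', d)]) = PySem.Dict.mk [('C', a), ('S', b), ('H', c), ('D', d + 1)] := rfl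
                simp only [eD]
                rw [ih, pvCnt_cons_neg t (by rw [hJ, hg]; rfl), pvCnt_cons_neg t (by rw [hJ, hg]; rfl),
                  pvCnt_cons_neg t (by rw [hJ, hg]; rfl), pvCnt_cons_pos t (by rw [hJ, hg]; rfl)]
                simp [add_assoc]
              · have hc : (PySem.Dict.mk [('C', a), ('S', b), ('H', c), ('D', d)]).contains ch = false := by
                  have hC' : ¬'C' = ch := fun h => hC h.symm
                  have hS' : ¬'S' = ch := fun h => hS h.symm
                  have hH' : ¬'H' = ch := fun h => hH h.symm
                  have hD' : ¬'D' = ch := fun h => hD h.symm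
                  simp [PySem.Dict.contains_mk, hC', hS', hH', hD']
                simp only []
                rw [if_neg (by rw [hc]; simp), ih,
                  pvCnt_cons_neg t (by rw [hJ, hg]; simp [hC]),
                  pvCnt_cons_neg t (by rw [hJ, hg]; simp [hS]),
                  pvCnt_cons_neg t (by rw [hJ, hg]; simp [hH]),
                  pvCnt_cons_neg t (by rw [hJ, hg]; simp [hD])]

-- B's test 'c.startswith(s)' (single-char s) equals A's 'c[0] == s'
lemma startswith_single (c : String) (s : Char) :
    PySem.Str.startswith c (String.ofList [s]) = (PySem.Str.pyGet? c 0 == some s) := by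
  rcases hc : c.toList with _ | ⟨x, t⟩ <;>
    simp [PySem.Str.startswith, PySem.Str.pyGet?, hc, PySem.Chars.startswith,
      PySem.Chars.pyGet?, PySem.List.pyGet?, PySem.List.pyIdx?, List.isPrefixOf, Bool.beq_comm]

-- ===== VERDICT (by name: the statement is the Claim_ definition above) =====
theorem parse_cards_max_suit_spec : Claim_equal_parse_cards_max_suit := by
  intro card_str _
  show parse_cards_max_suit card_str = parse_cards_max_suit_alt card_str
  simp only [parse_cards_max_suit, parse_cards_max_suit_alt]
  rw [show PySem.Dict.ofList [('C', (0:Int)), ('S', 0), ('H', 0), ('D', 0)]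
      = PySem.Dict.mk [('C', 0), ('S', 0), ('H', 0), ('D', 0)] from rfl,
    fold_values, show "CSHD".toList = ['C', 'S', 'H', 'D'] from rfl]
  simp only [List.map_cons, List.map_nil, startswith_single, zero_add, pvCnt]
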